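-- pv_equiv track=rewrite | github.com/Open-CP/OCP | operators/matrix.py | gf2_pow
-- ===== SOURCE A (Python) =====
-- def gf2_multiply(a, b, mod_poly, degree): #  Multiply two elements in GF(2^m) under a given modulus polynomial
--     result = 0
--     while b > 0:
--         if b & 1:
--             result ^= a
--         a <<= 1
--         if a & (1 << degree):  # If `a` exceeds m bits, reduce modulo `mod_poly`.
--             a ^= mod_poly
--         b >>= 1
--     return result & ((1 << degree) - 1)
--
-- def gf2_pow(a, e, mod_poly, degree):
--     """
--     Compute a^e in GF(2^m) using binary exponentiation.
--     """
--     result = 1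
--     base = a
--
--     while e > 0:
--         if e & 1:
--             result = gf2_multiply(result, base, mod_poly, degree)
--
--         base = gf2_multiply(base, base, mod_poly, degree)
--         e >>= 1
--
--     return result
-- ===== SOURCE B (Python) =====
-- def gf2_multiply(a, b, mod_poly, degree):
--     # MSB-first carry-less multiply: shift-and-reduce the accumulator, not the multiplicand
--     if b <= 0:
--         return 0
--     acc = 0
--     for i in range(b.bit_length() - 1, -1, -1):
--         acc <<= 1
--         if acc & (1 << degree):
--             acc ^= mod_poly
--         if (b >> i) & 1:
--             acc ^= a
--     return acc & ((1 << degree) - 1)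
--
--
-- def gf2_pow(a, e, mod_poly, degree):
--     if e <= 0:
--         return 1
--     result = 1
--     base = a
--     for i in range(e.bit_length()):
--         if (e >> i) & 1:
--             result = gf2_multiply(result, base, mod_poly, degree)
--         base = gf2_multiply(base, base, mod_poly, degree)
--     return result
-- ===== Notes on version B (the rewrite author's own statement) =====
-- stated objective: alternative
-- what changed: gf2_multiply is rewritten as an MSB-first carry-less multiply that shift-and-reduces the accumulator instead of the multiplicand (opposite bit-traversal order, different loop state), and gf2_pow iterates over explicit bit positions of e instead of destructively shifting e.
import Mathlib
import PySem

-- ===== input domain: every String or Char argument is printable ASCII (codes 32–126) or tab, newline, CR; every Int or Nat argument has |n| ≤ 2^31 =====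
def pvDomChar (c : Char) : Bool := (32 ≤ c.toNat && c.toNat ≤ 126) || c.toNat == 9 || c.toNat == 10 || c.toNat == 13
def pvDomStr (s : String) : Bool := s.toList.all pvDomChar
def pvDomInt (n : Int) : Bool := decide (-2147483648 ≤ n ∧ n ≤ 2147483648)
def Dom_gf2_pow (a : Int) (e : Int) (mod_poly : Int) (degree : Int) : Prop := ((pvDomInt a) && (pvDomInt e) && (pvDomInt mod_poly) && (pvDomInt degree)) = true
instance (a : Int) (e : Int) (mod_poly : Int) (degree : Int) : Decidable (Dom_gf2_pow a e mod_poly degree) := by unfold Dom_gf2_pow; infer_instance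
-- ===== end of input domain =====

-- B replaces A's LSB-first multiplicand-shifting GF(2^m) multiply by an MSB-first
-- accumulator shift-and-reduce multiply, and drives the exponent loop by explicit
-- bit positions of e instead of destructively shifting e (alternative decomposition).

-- termination helper for the ports' while-loops
theorem pv_shr1_toNat_lt (b : Int) (h : 0 < b) : (b >>> (1:Nat)).toNat < b.toNat := by
  cases b with
  | ofNat m =>
    show (Int.ofNat (m >>> 1)).toNat < (Int.ofNat m).toNat
    have h1 : (Int.ofNat (m >>> 1)).toNat = m >>> 1 := rfl
    have h2 : (Int.ofNat m).toNat = m := rfl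
    have hm : 0 < m := by
      have h' := h
      rw [show (Int.ofNat m) = ((m:Nat):Int) from rfl] at h'
      exact_mod_cast h'
    rw [h1, h2, Nat.shiftRight_one]; omega
  | negSucc m => exact absurd h (by omega)

-- ===== PORT A =====
-- while b > 0: … (gf2_multiply's loop; returns the masked result when the loop exits)
def gf2_multiply_loop (mod_poly : Int) (degree : Int) (a b result : Int) : Int :=
  if h : 0 < b then
    let result' := if PySem.Int.band b 1 ≠ 0 then PySem.Int.bxor result a else result
    let a1 := a <<< (1:Nat)
    let a2 := if PySem.Int.band a1 ((1:Int) <<< degree.toNat) ≠ 0 then PySem.Int.bxor a1 mod_poly else a1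
    gf2_multiply_loop mod_poly degree a2 (b >>> (1:Nat)) result'
  else
    PySem.Int.band result (((1:Int) <<< degree.toNat) - 1)
termination_by b.toNat
decreasing_by exact pv_shr1_toNat_lt b h

def gf2_multiply (a b mod_poly degree : Int) : Int :=
  gf2_multiply_loop mod_poly degree a b 0

-- ===== PORT B =====
-- for i in range(b.bit_length()-1, -1, -1): … — counter n+1 processes bit i = n (downward range)
def gf2_multiply_alt_walk (mod_poly : Int) (degree : Int) (a b : Int) (acc : Int) : Nat → Int
  | 0 => acc
  | n+1 =>
    let acc1 := acc <<< (1:Nat)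
    let acc2 := if PySem.Int.band acc1 ((1:Int) <<< degree.toNat) ≠ 0 then PySem.Int.bxor acc1 mod_poly else acc1
    let acc3 := if PySem.Int.band (b >>> n) 1 ≠ 0 then PySem.Int.bxor acc2 a else acc2
    gf2_multiply_alt_walk mod_poly degree a b acc3 n

def gf2_multiply_alt (a b mod_poly degree : Int) : Int :=
  if b ≤ 0 then 0
  else PySem.Int.band (gf2_multiply_alt_walk mod_poly degree a b 0 (PySem.Int.bitLength b))
        (((1:Int) <<< degree.toNat) - 1)

-- while e > 0: … (gf2_pow's loop)
def gf2_pow_loop (mod_poly : Int) (degree : Int) (result base e : Int) : Int :=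
  if h : 0 < e then
    let result' := if PySem.Int.band e 1 ≠ 0 then gf2_multiply result base mod_poly degree else result
    gf2_pow_loop mod_poly degree result' (gf2_multiply base base mod_poly degree) (e >>> (1:Nat))
  else result
termination_by e.toNat
decreasing_by exact pv_shr1_toNat_lt e h

def gf2_pow (a : Int) (e : Int) (mod_poly : Int) (degree : Int) : Int :=
  gf2_pow_loop mod_poly degree 1 a e

-- for i in range(e.bit_length()): …
def gf2_pow_alt (a : Int) (e : Int) (mod_poly : Int) (degree : Int) : Int :=
  if e ≤ 0 then 1
  else ((List.range (PySem.Int.bitLength e)).foldl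
        (fun (p : Int × Int) (i : Nat) =>
          (if PySem.Int.band (e >>> i) 1 ≠ 0 then gf2_multiply_alt p.1 p.2 mod_poly degree else p.1,
           gf2_multiply_alt p.2 p.2 mod_poly degree)) (1, a)).1

-- ===== PRECONDITION & SPEC =====
-- Pre_ excludes exactly the inputs where Python A raises: e > 0 with degree < 0 makes
-- gf2_multiply evaluate 1 << degree, a ValueError (negative shift count). A is total elsewhere.
def Pre_gf2_pow (a : Int) (e : Int) (mod_poly : Int) (degree : Int) : Prop := e ≤ 0 ∨ 0 ≤ degree
instance (a : Int) (e : Int) (mod_poly : Int) (degree : Int) : Decidable (Pre_gf2_pow a e mod_poly degree) := by unfold Pre_gf2_pow; infer_instance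

def pvWitness_gf2_pow : Int × Int × Int × Int := (3, 5, 19, 4)

def Spec_gf2_pow (a : Int) (e : Int) (mod_poly : Int) (degree : Int) (out : Int) : Prop := out = gf2_pow_alt a e mod_poly degree
instance (a : Int) (e : Int) (mod_poly : Int) (degree : Int) (out : Int) : Decidable (Spec_gf2_pow a e mod_poly degree out) := by unfold Spec_gf2_pow; infer_instance

-- ===== CLAIM (what is proved, stated in full; the proofs are below) =====
def Claim_equal_gf2_pow : Prop := ∀ (a : Int) (e : Int) (mod_poly : Int) (degree : Int), Dom_gf2_pow a e mod_poly degree → Pre_gf2_pow a e mod_poly degree → Spec_gf2_pow a e mod_poly degree (gf2_pow a e mod_poly degree)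

-- ===== LEMMAS AND PROOFS =====

def pvTb : Int → Nat → Bool
  | .ofNat n, i => n.testBit i
  | .negSucc n, i => !(n.testBit i)

theorem pvTb_shr (x : Int) (k i : Nat) : pvTb (x >>> k) i = pvTb x (k + i) := by
  cases x with
  | ofNat n =>
    show (n >>> k).testBit i = n.testBit (k+i)
    exact Nat.testBit_shiftRight n
  | negSucc n =>
    show (!(n >>> k).testBit i) = (!n.testBit (k+i))
    rw [Nat.testBit_shiftRight]

theorem pvTb_shl_zero (x : Int) : pvTb (x <<< (1:Nat)) 0 = false := by
  cases x with
  | ofNat n =>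
    show (n <<< 1).testBit 0 = false
    have h : n <<< 1 = 2*n := by rw [Nat.shiftLeft_eq]; omega
    simp [h, Nat.testBit_zero]
  | negSucc n =>
    show (!((n+1) <<< 1 - 1).testBit 0) = false
    have h : (n+1) <<< 1 - 1 = 2*n + 1 := by rw [Nat.shiftLeft_eq]; omega
    simp [h, Nat.testBit_zero]

theorem pvTb_shl (x : Int) (i : Nat) : pvTb (x <<< (1:Nat)) (i+1) = pvTb x i := by
  cases x with
  | ofNat n =>
    show (n <<< 1).testBit (i+1) = n.testBit i
    have h : n <<< 1 = 2*n := by rw [Nat.shiftLeft_eq]; omega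
    rw [h, Nat.testBit_succ]
    congr 1; omega
  | negSucc n =>
    show (!((n+1) <<< 1 - 1).testBit (i+1)) = (!n.testBit i)
    have h : (n+1) <<< 1 - 1 = 2*n+1 := by rw [Nat.shiftLeft_eq]; omega
    rw [h, Nat.testBit_succ]
    congr 2; omega

theorem pv_ofNat_nonneg (m : Nat) : 0 ≤ Int.ofNat m := Int.natCast_nonneg m
theorem pv_negSucc_not_nonneg (n : Nat) : ¬ (0:Int) ≤ Int.negSucc n := not_le.mpr (Int.negSucc_lt_zero n)

theorem pvTb_bxor (x y : Int) (i : Nat) : pvTb (PySem.Int.bxor x y) i = ((pvTb x i).xor (pvTb y i)) := by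
  cases x with
  | ofNat m =>
    cases y with
    | ofNat n =>
      have hbx : PySem.Int.bxor (Int.ofNat m) (Int.ofNat n) = Int.ofNat (m ^^^ n) := by
        unfold PySem.Int.bxor
        rw [if_pos (pv_ofNat_nonneg _), if_pos (pv_ofNat_nonneg _)]
        rfl
      rw [hbx]
      show (m ^^^ n).testBit i = (m.testBit i).xor (n.testBit i)
      rw [Nat.testBit_xor]
    | negSucc n =>
      have hbx : PySem.Int.bxor (Int.ofNat m) (Int.negSucc n) = Int.negSucc (m ^^^ n) := by
        unfold PySem.Int.bxor
        rw [if_pos (pv_ofNat_nonneg _), if_neg (pv_negSucc_not_nonneg _)]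
        have h1 : (-(Int.negSucc n) - 1).toNat = n := by omega
        have h2 : (Int.ofNat m).toNat = m := rfl
        rw [h1, h2, Int.negSucc_eq]
        omega
      rw [hbx]
      show (!(m ^^^ n).testBit i) = (m.testBit i).xor (!(n.testBit i))
      rw [Nat.testBit_xor]
      cases m.testBit i <;> cases n.testBit i <;> rfl
  | negSucc m =>
    cases y with
    | ofNat n =>
      have hbx : PySem.Int.bxor (Int.negSucc m) (Int.ofNat n) = Int.negSucc (m ^^^ n) := by
        unfold PySem.Int.bxor
        rw [if_neg (pv_negSucc_not_nonneg _), if_pos (pv_ofNat_nonneg _)]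
        have h1 : (-(Int.negSucc m) - 1).toNat = m := by omega
        have h2 : (Int.ofNat n).toNat = n := rfl
        rw [h1, h2, Int.negSucc_eq]
        omega
      rw [hbx]
      show (!(m ^^^ n).testBit i) = (!(m.testBit i)).xor (n.testBit i)
      rw [Nat.testBit_xor]
      cases m.testBit i <;> cases n.testBit i <;> rfl
    | negSucc n =>
      have hbx : PySem.Int.bxor (Int.negSucc m) (Int.negSucc n) = Int.ofNat (m ^^^ n) := by
        unfold PySem.Int.bxor
        rw [if_neg (pv_negSucc_not_nonneg _), if_neg (pv_negSucc_not_nonneg _)]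
        have h1 : (-(Int.negSucc m) - 1).toNat = m := by omega
        have h2 : (-(Int.negSucc n) - 1).toNat = n := by omega
        rw [h1, h2]; rfl
      rw [hbx]
      show (m ^^^ n).testBit i = (!(m.testBit i)).xor (!(n.testBit i))
      rw [Nat.testBit_xor]
      cases m.testBit i <;> cases n.testBit i <;> rfl

theorem pvTb_ext {x y : Int} (h : ∀ i, pvTb x i = pvTb y i) : x = y := by
  cases x with
  | ofNat m =>
    cases y with
    | ofNat n =>
      have : m = n := Nat.eq_of_testBit_eq (fun i => h i)
      rw [this]
    | negSucc n =>
      exfalso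
      have hm : m.testBit (m+n) = false :=
        Nat.testBit_lt_two_pow (lt_of_lt_of_le (Nat.lt_two_pow_self) (Nat.pow_le_pow_right (by omega) (by omega)))
      have hn : n.testBit (m+n) = false :=
        Nat.testBit_lt_two_pow (lt_of_lt_of_le (Nat.lt_two_pow_self) (Nat.pow_le_pow_right (by omega) (by omega)))
      have := h (m+n)
      rw [show pvTb (Int.ofNat m) (m+n) = m.testBit (m+n) from rfl,
          show pvTb (Int.negSucc n) (m+n) = !(n.testBit (m+n)) from rfl, hm, hn] at this
      exact absurd this (by decide)
  | negSucc m =>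
    cases y with
    | ofNat n =>
      exfalso
      have hm : m.testBit (m+n) = false :=
        Nat.testBit_lt_two_pow (lt_of_lt_of_le (Nat.lt_two_pow_self) (Nat.pow_le_pow_right (by omega) (by omega)))
      have hn : n.testBit (m+n) = false :=
        Nat.testBit_lt_two_pow (lt_of_lt_of_le (Nat.lt_two_pow_self) (Nat.pow_le_pow_right (by omega) (by omega)))
      have := h (m+n)
      rw [show pvTb (Int.negSucc m) (m+n) = !(m.testBit (m+n)) from rfl,
          show pvTb (Int.ofNat n) (m+n) = n.testBit (m+n) from rfl, hm, hn] at this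
      exact absurd this (by decide)
    | negSucc n =>
      have : m = n := Nat.eq_of_testBit_eq (fun i => Bool.not_inj (h i))
      rw [this]

theorem pv_band_pow (x : Int) (d : Nat) :
    PySem.Int.band x ((1:Int) <<< d) = if pvTb x d then (1:Int) <<< d else 0 := by
  have hpow : (1:Int) <<< d = Int.ofNat (2^d) := by
    show Int.ofNat (1 <<< d) = Int.ofNat (2^d)
    rw [Nat.one_shiftLeft]
  rw [hpow]
  cases x with
  | ofNat m =>
    have hb : PySem.Int.band (Int.ofNat m) (Int.ofNat (2^d)) = Int.ofNat (m &&& 2^d) := by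
      unfold PySem.Int.band
      rw [if_pos (pv_ofNat_nonneg _), if_pos (pv_ofNat_nonneg _)]
      rfl
    rw [hb, Nat.and_two_pow]
    show _ = if m.testBit d then _ else _
    cases h : m.testBit d <;> simp
  | negSucc m =>
    have hb : PySem.Int.band (Int.negSucc m) (Int.ofNat (2^d)) = Int.ofNat (2^d - (2^d &&& m)) := by
      unfold PySem.Int.band
      rw [if_neg (pv_negSucc_not_nonneg _), if_pos (pv_ofNat_nonneg _)]
      have h1 : (-(Int.negSucc m) - 1).toNat = m := by omega
      have h2 : (Int.ofNat (2^d)).toNat = 2^d := rfl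
      rw [h1, h2]
      rfl
    rw [hb, Nat.and_comm, Nat.and_two_pow]
    show _ = if !(m.testBit d) then _ else _
    cases h : m.testBit d <;> simp

theorem pv_band_pow_ne (x : Int) (d : Nat) :
    (PySem.Int.band x ((1:Int) <<< d) ≠ 0) ↔ pvTb x d = true := by
  rw [pv_band_pow]
  cases h : pvTb x d <;> simp

theorem pv_one_shl_zero : ((1:Int) <<< (0:Nat)) = 1 := rfl

theorem pv_band_one_ne (x : Int) : (PySem.Int.band x 1 ≠ 0) ↔ pvTb x 0 = true := by
  have := pv_band_pow_ne x 0
  rwa [pv_one_shl_zero] at this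

theorem pv_bxor_assoc (x y z : Int) :
    PySem.Int.bxor (PySem.Int.bxor x y) z = PySem.Int.bxor x (PySem.Int.bxor y z) := by
  apply pvTb_ext
  intro i
  simp [pvTb_bxor]

theorem pv_bxor_zero_left (x : Int) : PySem.Int.bxor 0 x = x := by
  rw [PySem.Int.bxor_comm, PySem.Int.bxor_zero]

theorem pv_shl_bxor (x y : Int) :
    (PySem.Int.bxor x y) <<< (1:Nat) = PySem.Int.bxor (x <<< (1:Nat)) (y <<< (1:Nat)) := by
  apply pvTb_ext
  intro i
  cases i with
  | zero => rw [pvTb_shl_zero, pvTb_bxor, pvTb_shl_zero, pvTb_shl_zero]; rfl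
  | succ j => rw [pvTb_shl, pvTb_bxor, pvTb_bxor, pvTb_shl, pvTb_shl]

def pvStep (mod_poly : Int) (d : Nat) (x : Int) : Int :=
  if PySem.Int.band (x <<< (1:Nat)) ((1:Int) <<< d) ≠ 0
  then PySem.Int.bxor (x <<< (1:Nat)) mod_poly else x <<< (1:Nat)

theorem pv_shl_zero_val : ((0:Int) <<< (1:Nat)) = 0 := rfl

theorem pv_band_zero_left (d : Nat) : PySem.Int.band 0 ((1:Int) <<< d) = 0 := by
  rw [PySem.Int.band_comm, PySem.Int.band_zero]

theorem pvStep_zero (mod_poly : Int) (d : Nat) : pvStep mod_poly d 0 = 0 := by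
  unfold pvStep
  rw [pv_shl_zero_val]
  simp [pv_band_zero_left]

theorem pvStep_bxor (mod_poly : Int) (d : Nat) (x y : Int) :
    pvStep mod_poly d (PySem.Int.bxor x y) = PySem.Int.bxor (pvStep mod_poly d x) (pvStep mod_poly d y) := by
  have hpos : ∀ z:Int, pvTb z d = true → (PySem.Int.band z ((1:Int)<<<d) ≠ 0) :=
    fun z hz => (pv_band_pow_ne z d).mpr hz
  have hneg : ∀ z:Int, pvTb z d = false → ¬(PySem.Int.band z ((1:Int)<<<d) ≠ 0) :=
    fun z hz hc => by rw [(pv_band_pow_ne z d).mp hc] at hz; cases hz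
  unfold pvStep
  rw [pv_shl_bxor]
  by_cases hx : pvTb (x <<< (1:Nat)) d = true
  · by_cases hy : pvTb (y <<< (1:Nat)) d = true
    · rw [if_pos (hpos _ hx), if_pos (hpos _ hy),
        if_neg (hneg _ (by rw [pvTb_bxor, hx, hy]; rfl))]
      apply pvTb_ext; intro i
      simp [pvTb_bxor, Bool.xor_assoc, Bool.xor_comm, Bool.xor_left_comm]
    · have hy' : pvTb (y <<< (1:Nat)) d = false := by revert hy; cases pvTb (y <<< (1:Nat)) d <;> simp
      rw [if_pos (hpos _ hx), if_neg (hneg _ hy'),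
        if_pos (hpos _ (by rw [pvTb_bxor, hx, hy']; rfl))]
      apply pvTb_ext; intro i
      simp [pvTb_bxor, Bool.xor_assoc, Bool.xor_comm, Bool.xor_left_comm]
  · have hx' : pvTb (x <<< (1:Nat)) d = false := by revert hx; cases pvTb (x <<< (1:Nat)) d <;> simp
    by_cases hy : pvTb (y <<< (1:Nat)) d = true
    · rw [if_neg (hneg _ hx'), if_pos (hpos _ hy),
        if_pos (hpos _ (by rw [pvTb_bxor, hx', hy]; rfl))]
      apply pvTb_ext; intro i
      simp [pvTb_bxor, Bool.xor_assoc, Bool.xor_comm, Bool.xor_left_comm]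
    · have hy' : pvTb (y <<< (1:Nat)) d = false := by revert hy; cases pvTb (y <<< (1:Nat)) d <;> simp
      rw [if_neg (hneg _ hx'), if_neg (hneg _ hy'),
        if_neg (hneg _ (by rw [pvTb_bxor, hx', hy']; rfl))]

theorem pvStep_iter_zero (mod_poly : Int) (d : Nat) (n : Nat) : (pvStep mod_poly d)^[n] 0 = 0 := by
  induction n with
  | zero => rfl
  | succ k ih => rw [Function.iterate_succ_apply, pvStep_zero, ih]

theorem pvStep_iter_bxor (mod_poly : Int) (d : Nat) (n : Nat) (x y : Int) :
    (pvStep mod_poly d)^[n] (PySem.Int.bxor x y) =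
      PySem.Int.bxor ((pvStep mod_poly d)^[n] x) ((pvStep mod_poly d)^[n] y) := by
  induction n generalizing x y with
  | zero => rfl
  | succ k ih => rw [Function.iterate_succ_apply, pvStep_bxor, ih,
      Function.iterate_succ_apply, Function.iterate_succ_apply]

def pvAcc (mod_poly : Int) (d : Nat) (a b : Int) : Nat → Int
  | 0 => 0
  | n+1 => PySem.Int.bxor (pvAcc mod_poly d a b n) (if pvTb b n then (pvStep mod_poly d)^[n] a else 0)

theorem pvAcc_succ (mod_poly : Int) (d : Nat) (a b : Int) (n : Nat) :
    pvAcc mod_poly d a b (n+1) =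
      PySem.Int.bxor (pvAcc mod_poly d a b n) (if pvTb b n then (pvStep mod_poly d)^[n] a else 0) := rfl

theorem pv_acc_shift (mod_poly : Int) (d : Nat) (a b : Int) (n : Nat) :
    pvAcc mod_poly d a b (n+1) =
      PySem.Int.bxor (if pvTb b 0 then a else 0)
        (pvAcc mod_poly d (pvStep mod_poly d a) (b >>> (1:Nat)) n) := by
  induction n with
  | zero =>
    simp only [pvAcc, Function.iterate_zero, id]
    rw [pv_bxor_zero_left, PySem.Int.bxor_zero]
  | succ k ih =>
    rw [pvAcc_succ, ih, pvAcc_succ, pv_bxor_assoc]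
    congr 1
    congr 1
    rw [pvTb_shr, Nat.add_comm 1 k, Function.iterate_succ_apply]

theorem pv_shr1_nonneg (b : Int) (h : 0 ≤ b) : 0 ≤ b >>> (1:Nat) := by
  cases b with
  | ofNat m => exact pv_ofNat_nonneg _
  | negSucc m => exact absurd h (pv_negSucc_not_nonneg m)

theorem pv_shr1_eq_fdiv (b : Int) (h : 0 ≤ b) : b >>> (1:Nat) = PySem.Int.floordiv b 2 := by
  cases b with
  | ofNat m =>
    show Int.ofNat (m >>> 1) = PySem.Int.floordiv (Int.ofNat m) 2
    unfold PySem.Int.floordiv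
    rw [Nat.shiftRight_one]
    show ((m / 2 : Nat) : Int) = Int.fdiv ((m : Nat) : Int) ((2:Nat) : Int)
    rw [Int.fdiv_eq_ediv]
    omega
  | negSucc m => exact absurd h (pv_negSucc_not_nonneg m)

theorem pv_bitLength_pos_eq (b : Int) (h : 0 < b) :
    PySem.Int.bitLength b = PySem.Int.bitLength (b >>> (1:Nat)) + 1 := by
  rw [PySem.Int.bitLength_of_pos h, pv_shr1_eq_fdiv b (le_of_lt h)]

theorem pv_bitLength_zero_eq (b : Int) (h0 : 0 ≤ b) (h : PySem.Int.bitLength b = 0) : b = 0 := by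
  by_contra hne
  have hpos : 0 < b := lt_of_le_of_ne h0 (Ne.symm hne)
  rw [PySem.Int.bitLength_of_pos hpos] at h
  omega

theorem pv_shr_shr (x : Int) (i : Nat) : x >>> (1:Nat) >>> i = x >>> (i+1) := by
  cases x with
  | ofNat m =>
    show Int.ofNat (m >>> 1 >>> i) = Int.ofNat (m >>> (i+1))
    rw [← Nat.shiftRight_add, Nat.add_comm 1 i]
  | negSucc m =>
    show Int.negSucc (m >>> 1 >>> i) = Int.negSucc (m >>> (i+1))
    rw [← Nat.shiftRight_add, Nat.add_comm 1 i]

theorem pv_shr_zero (x : Int) : x >>> (0:Nat) = x := by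
  cases x with
  | ofNat m => show Int.ofNat (m >>> 0) = Int.ofNat m ; rw [Nat.shiftRight_zero]
  | negSucc m => show Int.negSucc (m >>> 0) = Int.negSucc m ; rw [Nat.shiftRight_zero]

theorem pv_mulA_char (mod_poly degree : Int) :
    ∀ n (b : Int), b.toNat = n → 0 ≤ b → ∀ a r,
      gf2_multiply_loop mod_poly degree a b r =
        PySem.Int.band (PySem.Int.bxor r (pvAcc mod_poly degree.toNat a b (PySem.Int.bitLength b)))
          (((1:Int) <<< degree.toNat) - 1) := by
  intro n
  induction n using Nat.strong_induction_on with
  | _ n ih =>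
    intro b hbn hb0 a r
    by_cases hb : 0 < b
    · rw [gf2_multiply_loop, dif_pos hb]
      have hstep : (if PySem.Int.band (a <<< (1:Nat)) ((1:Int) <<< degree.toNat) ≠ 0
          then PySem.Int.bxor (a <<< (1:Nat)) mod_poly else a <<< (1:Nat)) = pvStep mod_poly degree.toNat a := rfl
      simp only []
      rw [hstep]
      rw [ih (b >>> (1:Nat)).toNat (by rw [← hbn]; exact pv_shr1_toNat_lt b hb) (b >>> (1:Nat)) rfl
          (pv_shr1_nonneg b hb0) (pvStep mod_poly degree.toNat a) _]
      congr 1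
      rw [pv_bitLength_pos_eq b hb, pv_acc_shift]
      cases hbit : pvTb b 0 with
      | true =>
        rw [if_pos ((pv_band_one_ne b).mpr hbit), if_pos rfl, ← pv_bxor_assoc]
      | false =>
        rw [if_neg (fun hc => by rw [(pv_band_one_ne b).mp hc] at hbit; cases hbit),
            if_neg Bool.false_ne_true, pv_bxor_zero_left]
    · have hbz : b = 0 := by omega
      subst hbz
      rw [gf2_multiply_loop, dif_neg (by omega)]
      rw [PySem.Int.bitLength_zero]
      show _ = PySem.Int.band (PySem.Int.bxor r 0) _
      rw [PySem.Int.bxor_zero]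

theorem pv_mulB_char (mod_poly degree : Int) (a b : Int) :
    ∀ n acc, gf2_multiply_alt_walk mod_poly degree a b acc n =
      PySem.Int.bxor ((pvStep mod_poly degree.toNat)^[n] acc) (pvAcc mod_poly degree.toNat a b n) := by
  intro n
  induction n with
  | zero =>
    intro acc
    show acc = PySem.Int.bxor acc 0
    rw [PySem.Int.bxor_zero]
  | succ k ih =>
    intro acc
    show gf2_multiply_alt_walk mod_poly degree a b _ k = _
    have hstep : (if PySem.Int.band (acc <<< (1:Nat)) ((1:Int) <<< degree.toNat) ≠ 0
        then PySem.Int.bxor (acc <<< (1:Nat)) mod_poly else acc <<< (1:Nat)) = pvStep mod_poly degree.toNat acc := rfl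
    rw [hstep, ih]
    rw [pvAcc_succ]
    cases hbit : pvTb b k with
    | true =>
      rw [if_pos ((pv_band_one_ne _).mpr (by rw [pvTb_shr, Nat.add_zero, hbit])), if_pos rfl]
      rw [pvStep_iter_bxor, Function.iterate_succ_apply, pv_bxor_assoc]
      congr 1
      rw [PySem.Int.bxor_comm]
    | false =>
      rw [if_neg (fun hc => by
          have h2 := (pv_band_one_ne _).mp hc
          rw [pvTb_shr, Nat.add_zero, hbit] at h2
          cases h2), if_neg Bool.false_ne_true]
      rw [PySem.Int.bxor_zero, Function.iterate_succ_apply]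

theorem pv_mul_eq (a b mod_poly degree : Int) :
    gf2_multiply a b mod_poly degree = gf2_multiply_alt a b mod_poly degree := by
  unfold gf2_multiply gf2_multiply_alt
  by_cases hb : b ≤ 0
  · rw [if_pos hb, gf2_multiply_loop, dif_neg (by omega)]
    rw [PySem.Int.band_comm, PySem.Int.band_zero]
  · rw [if_neg hb]
    rw [pv_mulA_char mod_poly degree b.toNat b rfl (by omega) a 0]
    rw [pv_mulB_char mod_poly degree a b (PySem.Int.bitLength b) 0]
    rw [pvStep_iter_zero, pv_bxor_zero_left]

theorem pv_pow_char (mod_poly degree : Int) :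
    ∀ n (e : Int), 0 ≤ e → PySem.Int.bitLength e = n → ∀ r b,
      gf2_pow_loop mod_poly degree r b e =
        ((List.range n).foldl
          (fun (p : Int × Int) (i : Nat) =>
            (if PySem.Int.band (e >>> i) 1 ≠ 0 then gf2_multiply_alt p.1 p.2 mod_poly degree else p.1,
             gf2_multiply_alt p.2 p.2 mod_poly degree)) (r, b)).1 := by
  intro n
  induction n with
  | zero =>
    intro e he0 hlen r b
    have he : e = 0 := pv_bitLength_zero_eq e he0 hlen
    subst he
    rw [gf2_pow_loop, dif_neg (by omega)]
    rfl
  | succ k ih =>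
    intro e he0 hlen r b
    have hepos : 0 < e := by
      rcases lt_or_eq_of_le he0 with h | h
      · exact h
      · exfalso; rw [← h, PySem.Int.bitLength_zero] at hlen; cases hlen
    rw [gf2_pow_loop, dif_pos hepos]
    simp only []
    have hlen' : PySem.Int.bitLength (e >>> (1:Nat)) = k := by
      have := pv_bitLength_pos_eq e hepos
      omega
    rw [ih (e >>> (1:Nat)) (pv_shr1_nonneg e he0) hlen']
    rw [List.range_succ_eq_map, List.foldl_cons, List.foldl_map]
    have hfun : (fun (x : Int × Int) (y : Nat) =>
        (if PySem.Int.band (e >>> Nat.succ y) 1 ≠ 0 then gf2_multiply_alt x.1 x.2 mod_poly degree else x.1,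
         gf2_multiply_alt x.2 x.2 mod_poly degree)) =
        (fun (p : Int × Int) (i : Nat) =>
        (if PySem.Int.band (e >>> (1:Nat) >>> i) 1 ≠ 0 then gf2_multiply_alt p.1 p.2 mod_poly degree else p.1,
         gf2_multiply_alt p.2 p.2 mod_poly degree)) := by
      funext p i
      rw [pv_shr_shr]
    have hinit : (if PySem.Int.band e 1 ≠ 0 then gf2_multiply r b mod_poly degree else r,
        gf2_multiply b b mod_poly degree) =
        (if PySem.Int.band (e >>> (0:Nat)) 1 ≠ 0 then gf2_multiply_alt (r, b).1 (r, b).2 mod_poly degree else (r, b).1,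
         gf2_multiply_alt (r, b).2 (r, b).2 mod_poly degree) := by
      rw [pv_shr_zero, pv_mul_eq r b, pv_mul_eq b b]
    rw [hfun, ← hinit]

theorem pv_final (a e mod_poly degree : Int) :
    gf2_pow a e mod_poly degree = gf2_pow_alt a e mod_poly degree := by
  unfold gf2_pow gf2_pow_alt
  by_cases he : e ≤ 0
  · rw [if_pos he, gf2_pow_loop, dif_neg (by omega)]
  · rw [if_neg he]
    exact pv_pow_char mod_poly degree (PySem.Int.bitLength e) e (by omega) rfl 1 a

-- ===== VERDICT (by name: the statement is the Claim_ definition above) =====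
theorem gf2_pow_spec : Claim_equal_gf2_pow := by
  intro a e mod_poly degree _ _
  unfold Spec_gf2_pow
  exact pv_final a e mod_poly degree
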